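-- pv_equiv track=rewrite | github.com/dashkazaitseva/search_engine | parser_file.py | get_best_adds
-- ===== SOURCE A (Python) =====
-- from collections import defaultdict
-- from collections import Counter
--
-- def get_best_adds(phrases) -> dict:
--     word_after = defaultdict(list)
--     for phrase in phrases:
--         phrase = phrase.split()
--         for i in range(len(phrase) - 1):
--             word_after[phrase[i]].append(phrase[i + 1])
--     for word in word_after:
--         word_after[word] = Counter(word_after[word])
--         word_after[word] = word_after[word].most_common(3)
--         word_after[word] = [addition[0] for addition in word_after[word]]
--
--     return word_after
-- ===== SOURCE B (Python) =====
-- from collections import defaultdict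
-- from collections import Counter
--
-- def get_best_adds(phrases) -> dict:
--     pair_count = Counter()
--     for phrase in phrases:
--         toks = phrase.split()
--         pair_count.update(zip(toks, toks[1:]))
--     groups = defaultdict(list)
--     for (head, succ), cnt in pair_count.items():
--         groups[head].append((succ, cnt))
--     result = defaultdict(list)
--     for head, scs in groups.items():
--         best = sorted(scs, key=lambda sc: sc[1], reverse=True)[:3]
--         result[head] = [succ for succ, _ in best]
--     return result
-- ===== Notes on version B (the rewrite author's own statement) =====
-- stated objective: alternative
-- what changed: A builds a per-word list of successors and then runs a separate Counter + most_common(3) over each word's list; B instead counts one global Counter keyed by (word, successor) pairs in a single scan, groups those pair counts by head word, and takes the top 3 per head with one stable descending sort on the count.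
import Mathlib
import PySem

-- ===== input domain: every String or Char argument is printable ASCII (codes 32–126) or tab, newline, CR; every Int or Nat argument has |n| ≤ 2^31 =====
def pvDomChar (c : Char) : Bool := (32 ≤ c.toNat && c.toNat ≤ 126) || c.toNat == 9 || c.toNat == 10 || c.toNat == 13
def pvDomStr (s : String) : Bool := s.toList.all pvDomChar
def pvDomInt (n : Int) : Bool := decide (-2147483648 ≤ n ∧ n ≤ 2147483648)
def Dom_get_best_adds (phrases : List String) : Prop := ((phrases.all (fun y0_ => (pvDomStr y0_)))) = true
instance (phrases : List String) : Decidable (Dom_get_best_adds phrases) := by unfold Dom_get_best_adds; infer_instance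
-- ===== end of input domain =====

-- B replaces A's per-word successor lists + per-word Counter by one global (word, successor)
-- pair Counter that is then grouped by head word (a different decomposition, same cost class).
-- Both ports return the dict as its items list (insertion order).

-- ===== PORT A =====
-- A: defaultdict(list) of successor lists per word, then per word Counter + most_common(3).
-- most_common(3) is ported as its documented meaning: stable descending sort on the count, take 3
-- (CPython's heapq.nlargest is exactly sorted(items, key=count, reverse=True)[:3]).
-- The second Python loop rebinds word_after[word] from its old value only (keys untouched),
-- so it is ported as a map over the items.
def get_best_adds (phrases : List String) : List (String × List String) :=
  let word_after : PySem.Dict String (List String) :=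
    phrases.foldl (fun d ph =>
      let t := PySem.Str.split₀ ph
      (PySem.List.pyRange 0 ((t.length : Int) - 1) 1).foldl
        (fun d i => d.modify (PySem.List.pyGetD t i "") [] (· ++ [PySem.List.pyGetD t (i + 1) ""])) d)
      PySem.Dict.empty
  word_after.items.map (fun p =>
    (p.1, ((PySem.List.sorted (PySem.Dict.counter p.2).items (fun q => q.2) true).take 3).map (fun q => q.1)))

-- ===== PORT B =====
-- B: one global Counter over (word, successor) pairs (Counter.update = the modify-+1 loop),
-- grouped by head word, then per head the stable descending sort on the count, take 3.
def get_best_adds_alt (phrases : List String) : List (String × List String) :=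
  let pair_count : PySem.Dict (String × String) Int :=
    phrases.foldl (fun c ph =>
      let toks := PySem.Str.split₀ ph
      (toks.zip (PySem.List.slice toks (some 1) none)).foldl (fun c p => c.modify p 0 (· + 1)) c)
      PySem.Dict.empty
  let groups : PySem.Dict String (List (String × Int)) :=
    pair_count.items.foldl (fun g q => g.modify q.1.1 [] (· ++ [(q.1.2, q.2)])) PySem.Dict.empty
  let result : PySem.Dict String (List String) :=
    groups.items.foldl (fun r p =>
      r.insert p.1 (((PySem.List.sorted p.2 (fun sc => sc.2) true).take 3).map (fun sc => sc.1)))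
      PySem.Dict.empty
  result.items

-- ===== PRECONDITION & SPEC =====
def Spec_get_best_adds (phrases : List String) (out : List (String × List String)) : Prop := out = get_best_adds_alt phrases
instance (phrases : List String) (out : List (String × List String)) : Decidable (Spec_get_best_adds phrases out) := by unfold Spec_get_best_adds; infer_instance

-- ===== CLAIM (what is proved, stated in full; the proofs are below) =====
def Claim_equal_get_best_adds : Prop := ∀ (phrases : List String), Dom_get_best_adds phrases → Spec_get_best_adds phrases (get_best_adds phrases)


-- ===== LEMMAS AND PROOFS =====

-- shared shapes used only by the proofs
def pvTop3 (l : List (String × Int)) : List String :=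
  ((PySem.List.sorted l (fun sc => sc.2) true).take 3).map (fun sc => sc.1)

def pvP (phrases : List String) : List (String × String) :=
  phrases.flatMap (fun ph => (PySem.Str.split₀ ph).zip ((PySem.Str.split₀ ph).drop 1))

-- dedup of a mapped list = dedup of the map of the dedup
theorem pv_dedup_map_dedup {α β : Type} [BEq α] [LawfulBEq α] [BEq β] [LawfulBEq β]
    (f : α → β) (l : List α) :
    PySem.Set.ofList (l.map f) = PySem.Set.ofList ((PySem.Set.ofList l).map f) := by
  induction l using List.reverseRecOn with
  | nil => rfl
  | append_singleton l x ih =>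
    rw [List.map_append, List.map_singleton, PySem.Set.ofList_append_singleton,
        PySem.Set.ofList_append_singleton]
    by_cases hx : x ∈ l
    · have h1 : (PySem.Set.ofList l).add x = PySem.Set.ofList l := by
        simp [PySem.Set.add, PySem.Set.contains, PySem.Set.mem_ofList, hx]
      have h2 : (PySem.Set.ofList (l.map f)).add (f x) = PySem.Set.ofList (l.map f) := by
        have : f x ∈ PySem.Set.ofList (l.map f) := by
          rw [PySem.Set.mem_ofList]; exact List.mem_map_of_mem hx
        simp [PySem.Set.add, PySem.Set.contains, this]
      rw [h1, h2, ih]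
    · have h1 : (PySem.Set.ofList l).add x = PySem.Set.ofList l ++ [x] := by
        simp [PySem.Set.add, PySem.Set.contains, PySem.Set.mem_ofList, hx]
      rw [h1, List.map_append, List.map_singleton, PySem.Set.ofList_append_singleton, ih]

-- dedup commutes with filter
theorem pv_dedup_filter {α : Type} [BEq α] [LawfulBEq α] (p : α → Bool) (l : List α) :
    PySem.Set.ofList (l.filter p) = (PySem.Set.ofList l).filter p := by
  induction l using List.reverseRecOn with
  | nil => rfl
  | append_singleton l x ih =>
    by_cases hp : p x <;> by_cases hx : x ∈ l <;>
      simp [List.filter_append, PySem.Set.ofList_append_singleton, PySem.Set.add,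
            PySem.Set.contains, PySem.Set.mem_ofList, List.mem_filter, hp, hx, ih]

-- dedup commutes with an injective-on-the-list map
theorem pv_dedup_map_inj {α β : Type} [BEq α] [LawfulBEq α] [BEq β] [LawfulBEq β]
    (f : α → β) (l : List α) (hinj : ∀ a ∈ l, ∀ b ∈ l, f a = f b → a = b) :
    PySem.Set.ofList (l.map f) = (PySem.Set.ofList l).map f := by
  induction l using List.reverseRecOn with
  | nil => rfl
  | append_singleton l x ih =>
    have hinj' : ∀ a ∈ l, ∀ b ∈ l, f a = f b → a = b := fun a ha b hb =>
      hinj a (List.mem_append_left _ ha) b (List.mem_append_left _ hb)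
    rw [List.map_append, List.map_singleton, PySem.Set.ofList_append_singleton,
        PySem.Set.ofList_append_singleton]
    by_cases hx : x ∈ l
    · have h1 : (PySem.Set.ofList l).add x = PySem.Set.ofList l := by
        simp [PySem.Set.add, PySem.Set.contains, PySem.Set.mem_ofList, hx]
      have h2 : (PySem.Set.ofList (l.map f)).add (f x) = PySem.Set.ofList (l.map f) := by
        have : f x ∈ PySem.Set.ofList (l.map f) := by
          rw [PySem.Set.mem_ofList]; exact List.mem_map_of_mem hx
        simp [PySem.Set.add, PySem.Set.contains, this]
      rw [h1, h2, ih hinj']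
    · have h1 : (PySem.Set.ofList l).add x = PySem.Set.ofList l ++ [x] := by
        simp [PySem.Set.add, PySem.Set.contains, PySem.Set.mem_ofList, hx]
      have h2 : (PySem.Set.ofList (l.map f)).add (f x) = PySem.Set.ofList (l.map f) ++ [f x] := by
        have hfx : f x ∉ PySem.Set.ofList (l.map f) := by
          rw [PySem.Set.mem_ofList]
          intro hmem
          obtain ⟨a, ha, hfa⟩ := List.mem_map.1 hmem
          have hax : a = x := hinj a (List.mem_append_left _ ha) x
            (List.mem_append_right _ (List.mem_singleton_self x)) hfa
          exact hx (hax ▸ ha)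
        simp [PySem.Set.add, PySem.Set.contains, hfx]
      rw [h1, h2, ih hinj', List.map_append, List.map_singleton]

-- counting a successor in the per-head list = counting the pair globally
theorem pv_count_snd_filter {α β : Type} [BEq α] [LawfulBEq α] [BEq β] [LawfulBEq β]
    (P : List (α × β)) (h : α) (s : β) :
    List.count s ((P.filter (fun q => q.1 == h)).map (fun q => q.2)) = List.count (h, s) P := by
  induction P with
  | nil => rfl
  | cons q P ih =>
    by_cases h1 : q.1 = h <;> by_cases h2 : q.2 = s <;>
      simp [List.count_cons, h1, h2, Prod.ext_iff, ih]

-- the index loop 'for i in range(len(t)-1)' reads exactly the adjacent pairs zip(t, t[1:])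
theorem pv_range_zip {α : Type} (t : List α) (dflt : α) :
    (PySem.List.pyRange 0 ((t.length : Int) - 1) 1).map
      (fun i => (PySem.List.pyGetD t i dflt, PySem.List.pyGetD t (i + 1) dflt))
      = t.zip (t.drop 1) := by
  apply List.ext_getElem
  · simp [PySem.List.length_pyRange_one]
  · intro i h1 h2
    have hi : i < t.length - 1 := by
      rw [List.length_map, PySem.List.length_pyRange_one] at h1; omega
    have hi1 : i < t.length := by omega
    have hi2 : i + 1 < t.length := by omega
    rw [List.getElem_map, PySem.List.getElem_pyRange_one, List.getElem_zip]
    have e1 : (0 : Int) + (i : Int) = ((i : Nat) : Int) := by ring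
    rw [e1]
    have e2 : ((i : Nat) : Int) + 1 = (((i + 1 : Nat)) : Int) := by push_cast; ring
    rw [e2, PySem.List.pyGetD_natCast, PySem.List.pyGetD_natCast,
        List.getD_eq_getElem t dflt hi1, List.getD_eq_getElem t dflt hi2]
    have hd : (t.drop 1)[i]'(by simpa using hi) = t[i + 1]'hi2 := by
      rw [List.getElem_drop]
      congr 1
      omega
    rw [hd]

-- A's dict-building phase, reduced to a single fold over the global pair list
theorem pv_A_items (phrases : List String) :
    get_best_adds phrases
      = (PySem.Set.ofList ((pvP phrases).map (fun q => q.1))).map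
          (fun w => (w, pvTop3 ((PySem.Dict.counter
              (((pvP phrases).filter (fun q => q.1 == w)).map (fun q => q.2))).items))) := by
  unfold get_best_adds
  dsimp only
  have hinner : ∀ (d : PySem.Dict String (List String)) (ph : String),
      (PySem.List.pyRange 0 (((PySem.Str.split₀ ph).length : Int) - 1) 1).foldl
        (fun d i => d.modify (PySem.List.pyGetD (PySem.Str.split₀ ph) i "") []
          (· ++ [PySem.List.pyGetD (PySem.Str.split₀ ph) (i + 1) ""])) d
      = ((PySem.Str.split₀ ph).zip ((PySem.Str.split₀ ph).drop 1)).foldl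
          (fun d p => d.modify p.1 [] (· ++ [p.2])) d := by
    intro d ph
    rw [← pv_range_zip (PySem.Str.split₀ ph) "", List.foldl_map]
  simp only [hinner]
  have hfold : phrases.foldl (fun d ph => ((PySem.Str.split₀ ph).zip ((PySem.Str.split₀ ph).drop 1)).foldl
        (fun d p => d.modify p.1 [] (· ++ [p.2])) d) PySem.Dict.empty
      = (pvP phrases).foldl (fun d p => d.modify p.1 [] (· ++ [p.2])) PySem.Dict.empty := by
    rw [pvP, List.foldl_flatMap]
  rw [hfold]
  set dA := (pvP phrases).foldl (fun d p => d.modify p.1 [] (· ++ [p.2])) PySem.Dict.empty with hdA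
  have hnd : dA.keys.Nodup := by
    exact PySem.Dict.nodup_keys_foldl_modify_key (pvP phrases) (fun p => p.1) ([] : List String)
      (fun _ p => (· ++ [p.2])) PySem.Dict.empty (by simp [PySem.Dict.keys_empty])
  have hkeys : dA.keys = PySem.Set.ofList ((pvP phrases).map (fun q => q.1)) := by
    have := PySem.Dict.keys_foldl_modify_key (pvP phrases) (fun p => p.1) ([] : List String)
      (fun _ p => (· ++ [p.2])) PySem.Dict.empty
    simpa [PySem.Dict.keys_empty, PySem.Set.update_nil_left] using this
  have hget : ∀ w, dA.getD w [] = ((pvP phrases).filter (fun q => q.1 == w)).map (fun q => q.2) := by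
    intro w
    have := PySem.Dict.getD_foldl_modify_append (pvP phrases) PySem.Dict.empty w
    simpa [PySem.Dict.getD_empty] using this
  rw [PySem.Dict.items_eq_map_keys dA hnd [], hkeys, List.map_map]
  apply List.map_congr_left
  intro w hw
  simp only [Function.comp]
  rw [hget w]
  rfl

-- B's phases, reduced to the same canonical shape
theorem pv_B_items (phrases : List String) :
    get_best_adds_alt phrases
      = (PySem.Set.ofList ((PySem.Set.ofList (pvP phrases)).map (fun q => q.1))).map
          (fun w => (w, pvTop3 (((PySem.Set.ofList (pvP phrases)).filter (fun q => q.1 == w)).map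
              (fun q => (q.2, (List.count q (pvP phrases) : Int)))))) := by
  unfold get_best_adds_alt
  dsimp only
  have hsl : ∀ toks : List String, PySem.List.slice toks (some 1) none = toks.drop 1 := by
    intro toks
    rw [PySem.List.slice_from toks (by norm_num)]
    norm_num
  simp only [hsl]
  have hpc : phrases.foldl (fun c ph => ((PySem.Str.split₀ ph).zip ((PySem.Str.split₀ ph).drop 1)).foldl
        (fun c p => c.modify p 0 (· + 1)) c) PySem.Dict.empty
      = PySem.Dict.counter (pvP phrases) := by
    rw [PySem.Dict.counter_eq_foldl, pvP, List.foldl_flatMap]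
  rw [hpc, PySem.Dict.items_counter]
  set L := (PySem.Set.ofList (pvP phrases)).map
    (fun k => (k, (List.count k (pvP phrases) : Int))) with hL
  have hg : L.foldl (fun g q => g.modify q.1.1 [] (· ++ [(q.1.2, q.2)])) PySem.Dict.empty
      = (L.map (fun q => (q.1.1, (q.1.2, q.2)))).foldl
          (fun g p => g.modify p.1 [] (· ++ [p.2])) PySem.Dict.empty :=
    (List.foldl_map (f := fun q : (String × String) × Int => (q.1.1, (q.1.2, q.2)))
      (g := fun (g : PySem.Dict String (List (String × Int))) (p : String × (String × Int)) =>
        g.modify p.1 [] (· ++ [p.2]))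
      (l := L) (init := PySem.Dict.empty)).symm
  rw [hg]
  have hM : L.map (fun q => (q.1.1, (q.1.2, q.2)))
      = (PySem.Set.ofList (pvP phrases)).map
          (fun q => (q.1, (q.2, (List.count q (pvP phrases) : Int)))) := by
    rw [hL, List.map_map]
    rfl
  rw [hM]
  set M := (PySem.Set.ofList (pvP phrases)).map
    (fun q => (q.1, (q.2, (List.count q (pvP phrases) : Int)))) with hMdef
  set groups := M.foldl (fun g p => g.modify p.1 [] (· ++ [p.2])) PySem.Dict.empty with hgroups
  have hndg : groups.keys.Nodup := by
    exact PySem.Dict.nodup_keys_foldl_modify_key M (fun p => p.1) ([] : List (String × Int))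
      (fun _ p => (· ++ [p.2])) PySem.Dict.empty (by simp [PySem.Dict.keys_empty])
  have hkeysg : groups.keys = PySem.Set.ofList ((PySem.Set.ofList (pvP phrases)).map (fun q => q.1)) := by
    have := PySem.Dict.keys_foldl_modify_key M (fun p => p.1) ([] : List (String × Int))
      (fun _ p => (· ++ [p.2])) PySem.Dict.empty
    rw [hMdef] at this
    simpa [PySem.Dict.keys_empty, PySem.Set.update_nil_left, List.map_map, Function.comp] using this
  have hgetg : ∀ w, groups.getD w []
      = ((PySem.Set.ofList (pvP phrases)).filter (fun q => q.1 == w)).map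
          (fun q => (q.2, (List.count q (pvP phrases) : Int))) := by
    intro w
    have := PySem.Dict.getD_foldl_modify_append M PySem.Dict.empty w
    rw [hMdef, List.filter_map, List.map_map] at this
    simpa [PySem.Dict.getD_empty, Function.comp] using this
  have hfresh : ∀ p ∈ groups.items,
      (PySem.Dict.empty : PySem.Dict String (List String)).contains p.1 = false :=
    fun p _ => PySem.Dict.contains_empty p.1
  have hnd2 : (groups.items.map (fun p => p.1)).Nodup := by
    simpa [PySem.Dict.keys] using hndg
  have hres := PySem.Dict.items_foldl_insert_fresh groups.items (fun p => p.1)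
      (fun p => ((PySem.List.sorted p.2 (fun sc => sc.2) true).take 3).map (fun sc => sc.1))
      PySem.Dict.empty hfresh hnd2
  rw [hres]
  have hempty : (PySem.Dict.empty : PySem.Dict String (List String)).items = [] := rfl
  rw [hempty, List.nil_append]
  rw [PySem.Dict.items_eq_map_keys groups hndg [], hkeysg, List.map_map]
  apply List.map_congr_left
  intro w hw
  simp only [Function.comp]
  rw [hgetg w]
  rfl

theorem pv_main (phrases : List String) : get_best_adds phrases = get_best_adds_alt phrases := by
  rw [pv_A_items, pv_B_items, ← pv_dedup_map_dedup]
  apply List.map_congr_left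
  intro w hw
  have hinj : ∀ a ∈ (pvP phrases).filter (fun q => q.1 == w),
      ∀ b ∈ (pvP phrases).filter (fun q => q.1 == w), a.2 = b.2 → a = b := by
    intro a ha b hb hab
    have ha1 : a.1 = w := by simpa using (List.mem_filter.1 ha).2
    have hb1 : b.1 = w := by simpa using (List.mem_filter.1 hb).2
    exact Prod.ext (ha1.trans hb1.symm) hab
  rw [PySem.Dict.items_counter,
      pv_dedup_map_inj (fun q => q.2) ((pvP phrases).filter (fun q => q.1 == w)) hinj,
      pv_dedup_filter, List.map_map]
  refine congrArg _ (congrArg _ (List.map_congr_left ?_))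
  intro q hq
  obtain ⟨q1, q2⟩ := q
  have hq1 : q1 = w := by
    simpa using (List.mem_filter.1 hq).2
  have hqc : List.count q2 (((pvP phrases).filter (fun q => q.1 == w)).map (fun q => q.2))
      = List.count (q1, q2) (pvP phrases) := by
    rw [pv_count_snd_filter, hq1]
  simp only [Function.comp]
  rw [hqc]

-- ===== VERDICT (by name: the statement is the Claim_ definition above) =====
theorem get_best_adds_spec : Claim_equal_get_best_adds := by
  intro phrases _
  unfold Spec_get_best_adds
  exact pv_main phrases
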